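-- pv_equiv track=rewrite | github.com/vdcamino/DSA | Amazon/Pair_Of_Strings_Lexological.py | pair_highest_number_elem
-- ===== SOURCE A (Python) =====
-- def getLexologicalValue(my_pair_of_strings):
--     return min(my_pair_of_strings[0], my_pair_of_strings[1])
--
-- def pair_highest_number_elem(my_list_of_strings):
--     res = list()
--     max_pair_size = -1
--     max_pair_lexological_val = -1
--     for pair in my_list_of_strings:
--         curr_pair_length = len(pair[0]) + len(pair[1])
--         if curr_pair_length > max_pair_size or (
--             curr_pair_length == max_pair_size
--             and getLexologicalValue(pair) < max_pair_lexological_val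
--         ):
--             res.insert(0, [pair[0], pair[1]])
--             max_pair_lexological_val = getLexologicalValue(pair)
--             max_pair_size = curr_pair_length
--     return res[0]
-- ===== SOURCE B (Python) =====
-- def getLexologicalValue(my_pair_of_strings):
--     return min(my_pair_of_strings[0], my_pair_of_strings[1])
--
--
-- def pair_highest_number_elem(my_list_of_strings):
--     # pass 1: the largest combined length
--     max_len = -1
--     for pair in my_list_of_strings:
--         curr = len(pair[0]) + len(pair[1])
--         if curr > max_len:
--             max_len = curr
--     # pass 2: among max-length pairs keep the first one with the smallest lex value
--     best = []
--     for pair in my_list_of_strings: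
--         if len(pair[0]) + len(pair[1]) == max_len:
--             if not best or getLexologicalValue(pair) < getLexologicalValue(best[0]):
--                 best = [[pair[0], pair[1]]]
--     return best[0]
-- ===== Notes on version B (the rewrite author's own statement) =====
-- stated objective: simpler
-- what changed: Replaces A's single sequential scan that keeps every intermediate leader in a history list (res.insert(0,...), then res[0]) by two plain passes: one computing the maximum combined length, one selecting the first minimal-lex pair of that length, keeping only one candidate.
import Mathlib
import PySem

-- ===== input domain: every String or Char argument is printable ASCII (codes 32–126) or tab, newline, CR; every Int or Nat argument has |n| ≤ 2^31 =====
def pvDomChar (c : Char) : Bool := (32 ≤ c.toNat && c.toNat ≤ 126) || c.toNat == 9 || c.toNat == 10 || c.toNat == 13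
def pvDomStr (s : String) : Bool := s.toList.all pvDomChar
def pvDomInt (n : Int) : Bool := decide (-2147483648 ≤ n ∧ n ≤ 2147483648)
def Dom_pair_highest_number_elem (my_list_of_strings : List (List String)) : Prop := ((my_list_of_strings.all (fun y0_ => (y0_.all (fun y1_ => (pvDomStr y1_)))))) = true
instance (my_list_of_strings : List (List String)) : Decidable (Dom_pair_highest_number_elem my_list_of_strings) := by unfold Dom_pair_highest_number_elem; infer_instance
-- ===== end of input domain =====

-- B replaces A's growing leader-history list (res.insert(0, ...) then res[0]) with two plain
-- passes — max combined length, then first minimal-lex pair of that length — keeping one candidate.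


-- ===== PORT A =====
-- min(p[0], p[1]) (Python min keeps the first argument on a tie)
def getLexologicalValue (p0 p1 : String) : String := if p1 < p0 then p1 else p0

-- pair[0] / pair[1]; Pre_ guarantees both indices are in range, so the .getD default is never used
def pvProj0 (pair : List String) : String := (PySem.List.pyGet? pair 0).getD ""
def pvProj1 (pair : List String) : String := (PySem.List.pyGet? pair 1).getD ""

-- curr_pair_length = len(pair[0]) + len(pair[1])
def pvCombLen (pair : List String) : Int := PySem.Str.len (pvProj0 pair) + PySem.Str.len (pvProj1 pair)

-- getLexologicalValue(pair)
def pvLex (pair : List String) : String := getLexologicalValue (pvProj0 pair) (pvProj1 pair)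

-- 'getLexologicalValue(pair) < max_pair_lexological_val': max_pair_lexological_val starts as the
-- int -1 and is only ever compared after being overwritten by a string (curr = -1 is impossible),
-- so it is modelled as Option String with the comparison never firing on the initial none
def pvLtOpt (s : String) (o : Option String) : Bool :=
  match o with
  | some v => decide (s < v)
  | none => false

-- the body of A's for-loop; state = (res, max_pair_size, max_pair_lexological_val)
def pvStepA (st : List (List String) × Int × Option String) (pair : List String) :
    List (List String) × Int × Option String :=
  if pvCombLen pair > st.2.1 ∨ (pvCombLen pair = st.2.1 ∧ pvLtOpt (pvLex pair) st.2.2 = true) then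
    ([pvProj0 pair, pvProj1 pair] :: st.1, pvCombLen pair, some (pvLex pair))
  else st

def pair_highest_number_elem (my_list_of_strings : List (List String)) : List String :=
  let st := my_list_of_strings.foldl pvStepA ([], -1, none)
  (PySem.List.pyGet? st.1 0).getD []      -- res[0]; Pre_ makes res nonempty

-- ===== PORT B =====
-- body of B's first loop (running max of the combined lengths)
def pvStepLen (m : Int) (pair : List String) : Int :=
  if pvCombLen pair > m then pvCombLen pair else m

-- body of B's second loop (first minimal-lex pair of combined length maxLen)
def pvStepB (maxLen : Int) (best : List (List String)) (pair : List String) : List (List String) :=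
  if pvCombLen pair = maxLen then
    match best with
    | [] => [[pvProj0 pair, pvProj1 pair]]
    | b :: _ =>
      if pvLex pair < getLexologicalValue ((PySem.List.pyGet? b 0).getD "") ((PySem.List.pyGet? b 1).getD "") then
        [[pvProj0 pair, pvProj1 pair]]
      else best
  else best

def pair_highest_number_elem_alt (my_list_of_strings : List (List String)) : List String :=
  let maxLen := my_list_of_strings.foldl pvStepLen (-1)
  let best := my_list_of_strings.foldl (pvStepB maxLen) []
  (PySem.List.pyGet? best 0).getD []      -- best[0]; Pre_ makes best nonempty

-- ===== PRECONDITION & SPEC =====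
-- A raises IndexError on the empty list (res[0]) and on any inner list with fewer than two
-- elements (pair[0]/pair[1]); exactly those inputs are excluded.
def Pre_pair_highest_number_elem (my_list_of_strings : List (List String)) : Prop :=
  my_list_of_strings ≠ [] ∧ ∀ p ∈ my_list_of_strings, 2 ≤ p.length
instance (my_list_of_strings : List (List String)) : Decidable (Pre_pair_highest_number_elem my_list_of_strings) := by unfold Pre_pair_highest_number_elem; infer_instance

def pvWitness_pair_highest_number_elem : List (List String) := [["ab", "c"], ["x", "yz"]]

def Spec_pair_highest_number_elem (my_list_of_strings : List (List String)) (out : List String) : Prop := out = pair_highest_number_elem_alt my_list_of_strings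
instance (my_list_of_strings : List (List String)) (out : List String) : Decidable (Spec_pair_highest_number_elem my_list_of_strings out) := by unfold Spec_pair_highest_number_elem; infer_instance

-- ===== CLAIM (what is proved, stated in full; the proofs are below) =====
def Claim_equal_pair_highest_number_elem : Prop := ∀ (my_list_of_strings : List (List String)), Dom_pair_highest_number_elem my_list_of_strings → Pre_pair_highest_number_elem my_list_of_strings → Spec_pair_highest_number_elem my_list_of_strings (pair_highest_number_elem my_list_of_strings)

-- ===== LEMMAS AND PROOFS =====

-- the abstract one-candidate selector both loops compute: state = (chosen pair, its projections)
def pvStep (c : List String × String × String) (pair : List String) : List String × String × String :=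
  if pvCombLen pair > pvCombLen c.1 ∨ (pvCombLen pair = pvCombLen c.1 ∧ pvLex pair < pvLex c.1) then
    (pair, pvProj0 pair, pvProj1 pair)
  else c

def pvPick (p : List String) (t : List (List String)) : List String × String × String :=
  t.foldl pvStep (p, pvProj0 p, pvProj1 p)

theorem pvPick_cons (p q : List String) (t : List (List String)) :
    pvPick p (q :: t)
      = if pvCombLen q > pvCombLen p ∨ (pvCombLen q = pvCombLen p ∧ pvLex q < pvLex p)
        then pvPick q t else pvPick p t := by
  show List.foldl pvStep (pvStep (p, pvProj0 p, pvProj1 p) q) t = _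
  unfold pvStep
  split <;> rfl

theorem pvCombLen_nonneg (p : List String) : 0 ≤ pvCombLen p := by
  have h0 := PySem.Str.len_eq (pvProj0 p)
  have h1 := PySem.Str.len_eq (pvProj1 p)
  unfold pvCombLen
  omega

theorem pvLexList (x y : String) :
    getLexologicalValue ((PySem.List.pyGet? [x, y] 0).getD "") ((PySem.List.pyGet? [x, y] 1).getD "")
      = getLexologicalValue x y := by
  simp [PySem.List.pyGet?, PySem.List.pyIdx?]

-- A's fold state tracks pvPick: second/third components and the head of res
theorem pvA_inv (t : List (List String)) (p : List String) (res : List (List String)) :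
    ∃ rest,
      List.foldl pvStepA ([pvProj0 p, pvProj1 p] :: res, pvCombLen p, some (pvLex p)) t
        = ([(pvPick p t).2.1, (pvPick p t).2.2] :: rest,
           pvCombLen (pvPick p t).1, some (pvLex (pvPick p t).1)) := by
  induction t generalizing p res with
  | nil => exact ⟨res, rfl⟩
  | cons q t ih =>
    simp only [List.foldl_cons]
    rw [pvPick_cons]
    by_cases h : pvCombLen q > pvCombLen p ∨ (pvCombLen q = pvCombLen p ∧ pvLex q < pvLex p)
    · have hA : pvStepA ([pvProj0 p, pvProj1 p] :: res, pvCombLen p, some (pvLex p)) q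
          = ([pvProj0 q, pvProj1 q] :: ([pvProj0 p, pvProj1 p] :: res), pvCombLen q, some (pvLex q)) := by
        unfold pvStepA
        rw [if_pos]
        simp only [pvLtOpt, decide_eq_true_eq]
        exact h
      rw [hA, if_pos h]
      exact ih q ([pvProj0 p, pvProj1 p] :: res)
    · have hA : pvStepA ([pvProj0 p, pvProj1 p] :: res, pvCombLen p, some (pvLex p)) q
          = ([pvProj0 p, pvProj1 p] :: res, pvCombLen p, some (pvLex p)) := by
        unfold pvStepA
        rw [if_neg]
        simp only [pvLtOpt, decide_eq_true_eq]
        exact h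
      rw [hA, if_neg h]
      exact ih p res

-- combined length of the pick = running max of the combined lengths (B's first loop)
theorem pvPick_len (t : List (List String)) (p : List String) :
    pvCombLen (pvPick p t).1 = List.foldl pvStepLen (pvCombLen p) t := by
  induction t generalizing p with
  | nil => rfl
  | cons q t ih =>
    rw [pvPick_cons]
    simp only [List.foldl_cons]
    by_cases h : pvCombLen q > pvCombLen p ∨ (pvCombLen q = pvCombLen p ∧ pvLex q < pvLex p)
    · have h2 : pvStepLen (pvCombLen p) q = pvCombLen q := by
        unfold pvStepLen
        rcases h with h | ⟨h, _⟩
        · rw [if_pos h]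
        · rw [h]; split <;> rfl
      rw [if_pos h, h2]; exact ih q
    · have h2 : pvStepLen (pvCombLen p) q = pvCombLen p := by
        unfold pvStepLen
        rw [if_neg (fun hq => h (Or.inl hq))]
      rw [if_neg h, h2]; exact ih p

theorem pvStepLen_le (m : Int) (q : List String) : m ≤ pvStepLen m q := by
  unfold pvStepLen; split <;> omega

theorem le_foldl_pvStepLen (t : List (List String)) (m : Int) :
    m ≤ List.foldl pvStepLen m t := by
  induction t generalizing m with
  | nil => exact le_refl m
  | cons q t ih => exact le_trans (pvStepLen_le m q) (ih _)

theorem mem_le_foldl_pvStepLen (t : List (List String)) (m : Int) (q : List String)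
    (hq : q ∈ t) : pvCombLen q ≤ List.foldl pvStepLen m t := by
  induction t generalizing m with
  | nil => cases hq
  | cons r t ih =>
    rcases List.mem_cons.mp hq with rfl | hq
    · refine le_trans ?_ (le_foldl_pvStepLen t (pvStepLen m q))
      unfold pvStepLen; split <;> omega
    · exact ih _ hq

-- B's second loop tracks pvPick, given a bound M that every combined length respects
theorem pvB_inv (t : List (List String)) (c : List String) (M : Int)
    (hb : ∀ q ∈ t, pvCombLen q ≤ M) (hc : pvCombLen c ≤ M) :
    List.foldl (pvStepB M) (if pvCombLen c = M then [[pvProj0 c, pvProj1 c]] else []) t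
      = (if pvCombLen (pvPick c t).1 = M
          then [[(pvPick c t).2.1, (pvPick c t).2.2]] else []) := by
  induction t generalizing c with
  | nil => rfl
  | cons q t ih =>
    have hqM : pvCombLen q ≤ M := hb q (List.mem_cons_self ..)
    have hb' : ∀ r ∈ t, pvCombLen r ≤ M := fun r hr => hb r (List.mem_cons_of_mem _ hr)
    simp only [List.foldl_cons]
    rw [pvPick_cons]
    by_cases h : pvCombLen q > pvCombLen c ∨ (pvCombLen q = pvCombLen c ∧ pvLex q < pvLex c)
    · -- the selector moves to q
      have hB : pvStepB M (if pvCombLen c = M then [[pvProj0 c, pvProj1 c]] else []) q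
          = (if pvCombLen q = M then [[pvProj0 q, pvProj1 q]] else []) := by
        by_cases hq : pvCombLen q = M
        · rw [if_pos hq]
          by_cases hcM : pvCombLen c = M
          · -- equal lengths: h must be the lex branch
            have hlex : pvLex q < pvLex c := by
              rcases h with h | ⟨_, h⟩
              · omega
              · exact h
            rw [if_pos hcM]
            unfold pvStepB
            rw [if_pos hq]
            show (if pvLex q < getLexologicalValue _ _ then _ else _) = _
            rw [pvLexList, show getLexologicalValue (pvProj0 c) (pvProj1 c) = pvLex c from rfl,
              if_pos hlex]
          · rw [if_neg hcM]
            unfold pvStepB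
            rw [if_pos hq]
        · -- q does not reach M; then c cannot be at M either (h gives pvCombLen c ≤ pvCombLen q)
          have hcM : ¬ pvCombLen c = M := by
            rcases h with h | ⟨h, _⟩ <;> omega
          rw [if_neg hq, if_neg hcM]
          unfold pvStepB
          rw [if_neg hq]
      rw [hB, if_pos h]
      exact ih q hb' hqM
    · -- the selector stays at c
      have hB : pvStepB M (if pvCombLen c = M then [[pvProj0 c, pvProj1 c]] else []) q
          = (if pvCombLen c = M then [[pvProj0 c, pvProj1 c]] else []) := by
        by_cases hq : pvCombLen q = M
        · have hle : ¬ pvCombLen q > pvCombLen c := fun hgt => h (Or.inl hgt)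
          have hcM : pvCombLen c = M := by omega
          have heq : pvCombLen q = pvCombLen c := by omega
          have hnlex : ¬ pvLex q < pvLex c := fun hl => h (Or.inr ⟨heq, hl⟩)
          rw [if_pos hcM]
          unfold pvStepB
          rw [if_pos hq]
          show (if pvLex q < getLexologicalValue _ _ then _ else _) = _
          rw [pvLexList, show getLexologicalValue (pvProj0 c) (pvProj1 c) = pvLex c from rfl,
            if_neg hnlex]
        · unfold pvStepB
          rw [if_neg hq]
      rw [hB, if_neg h]
      exact ih c hb' hc

-- ===== VERDICT (by name: the statement is the Claim_ definition above) =====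
theorem pair_highest_number_elem_spec : Claim_equal_pair_highest_number_elem := by
  intro l _ hpre
  obtain ⟨hne, -⟩ := hpre
  show pair_highest_number_elem l = pair_highest_number_elem_alt l
  cases l with
  | nil => cases hne rfl
  | cons p t =>
    unfold pair_highest_number_elem pair_highest_number_elem_alt
    simp only [List.foldl_cons]
    -- A's first step always fires (curr ≥ 0 > -1)
    have hA0 : pvStepA ([], -1, none) p = ([[pvProj0 p, pvProj1 p]], pvCombLen p, some (pvLex p)) := by
      unfold pvStepA
      rw [if_pos]
      left
      show (-1 : Int) < pvCombLen p
      have := pvCombLen_nonneg p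
      omega
    rw [hA0]
    obtain ⟨rest, hrest⟩ := pvA_inv t p []
    rw [hrest]
    -- B's first loop computes the combined length of the pick
    have hL0 : pvStepLen (-1) p = pvCombLen p := by
      unfold pvStepLen
      rw [if_pos]
      have := pvCombLen_nonneg p
      omega
    rw [hL0, ← pvPick_len t p]
    -- B's second loop
    have hB0 : pvStepB (pvCombLen (pvPick p t).1) [] p
        = (if pvCombLen p = pvCombLen (pvPick p t).1 then [[pvProj0 p, pvProj1 p]] else []) := by
      unfold pvStepB
      split <;> rfl
    rw [hB0, pvB_inv t p (pvCombLen (pvPick p t).1)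
          (fun q hq => by rw [pvPick_len]; exact mem_le_foldl_pvStepLen t _ q hq)
          (by rw [pvPick_len]; exact le_foldl_pvStepLen t _), if_pos rfl]
    simp
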